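-- pv_equiv track=rewrite | github.com/Peter-M-S/AdventOfCode2024 | day_09fast.py | shift_file
-- ===== SOURCE A (Python) =====
-- def shift_file(F: dict, S: list) -> dict:
--     for f_id, (f_start, f_len) in reversed(F.items()):
--         for i, (s_start, s_len) in enumerate(S):
--             if f_start < s_start: break  # no more spaces left of file
--             if f_len > s_len: continue  # file too big for this space
--
--             F[f_id] = (s_start, f_len)
--             s_len -= f_len
--             if s_len:
--                 S[i] = (s_start + f_len, s_len)
--             else:
--                 S.pop(i)
--             break  # must exit the loop, because S was modified
--     return F
-- ===== SOURCE B (Python) =====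
-- # B: segment tree over the free-space list (max start / max len per node); each file
-- # finds its stopping space by one descent of the tree rather than a scan of the list.
-- # Equivalence is about the return value (and the shared mutation of F): A also pops
-- # from / rewrites S in place, B leaves S untouched.
-- def shift_file(F: dict, S: list) -> dict:
--     if not S:
--         return F
--
--     NEG = -(1 << 62)  # below any value reachable from the bounded inputs
--
--     def build(i, j):
--         # node over S[i:j) as a list [max_start, max_len, left, right] (leaf: left is None)
--         if j - i <= 1:
--             a, l = S[i]
--             return [a, l, None, None]
--         m = (i + j) // 2
--         left = build(i, m)
--         right = build(m, j)
--         return [max(left[0], right[0]), max(left[1], right[1]), left, right]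
--
--     def place(t, f_start, f_len):
--         # returns "no" (no space in t stops the scan), None (scan breaks: space right
--         # of the file), or an int (file placed at that start; tree updated in place)
--         if not (t[0] > f_start or t[1] >= f_len):
--             return "no"
--         if t[2] is None:  # leaf: this is the first stopping space
--             if f_start < t[0]:
--                 return None
--             s_start = t[0]
--             rem = t[1] - f_len
--             if rem:
--                 t[0], t[1] = s_start + f_len, rem
--             else:
--                 t[0], t[1] = NEG, NEG  # space used up: deactivate
--             return s_start
--         r = place(t[2], f_start, f_len)
--         if r == "no":
--             r = place(t[3], f_start, f_len)
--         if isinstance(r, int):  # a placement modified a leaf: refresh the maxima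
--             t[0] = max(t[2][0], t[3][0])
--             t[1] = max(t[2][1], t[3][1])
--         return r
--
--     root = build(0, len(S))
--     for f_id in reversed(list(F.keys())):
--         f_start, f_len = F[f_id]
--         r = place(root, f_start, f_len)
--         if isinstance(r, int):
--             F[f_id] = (r, f_len)
--     return F
-- ===== Notes on version B (the rewrite author's own statement) =====
-- stated objective: alternative
-- what changed: A scans the free-space list linearly for every file (with in-place pop/rewrite); B builds a segment tree over the space list caching per-subtree maximum start and maximum length, finds each file's first stopping space by a single descent of that tree, and updates the affected leaf (a used-up space is deactivated with a sentinel instead of being popped).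
import Mathlib
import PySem

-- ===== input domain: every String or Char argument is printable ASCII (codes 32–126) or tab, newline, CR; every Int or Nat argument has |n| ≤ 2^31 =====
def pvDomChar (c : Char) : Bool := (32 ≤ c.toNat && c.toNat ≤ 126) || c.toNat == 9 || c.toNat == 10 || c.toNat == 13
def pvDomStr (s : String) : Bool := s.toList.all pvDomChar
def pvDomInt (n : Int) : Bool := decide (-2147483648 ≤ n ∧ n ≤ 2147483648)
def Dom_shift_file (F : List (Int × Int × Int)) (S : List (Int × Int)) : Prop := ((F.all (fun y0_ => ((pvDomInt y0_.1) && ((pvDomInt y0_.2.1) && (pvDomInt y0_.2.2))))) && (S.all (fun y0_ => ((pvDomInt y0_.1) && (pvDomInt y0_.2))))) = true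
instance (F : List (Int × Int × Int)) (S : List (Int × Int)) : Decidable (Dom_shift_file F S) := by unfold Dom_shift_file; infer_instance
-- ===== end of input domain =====

-- B replaces A's per-file linear scan of the space list by a segment tree (max start /
-- max len), one descent of the tree per file. Equivalence is about the return value and
-- the shared update of F: Python A also mutates S in place, B leaves S untouched.

-- ===== PORT A =====
-- inner 'for i, (s_start, s_len) in enumerate(S)' loop of A: returns the placement
-- start (if any) and the updated space list (entry rewritten or popped)
def pvShiftAFile (fs fl : Int) : List (Int × Int) → Option Int × List (Int × Int)
  | [] => (none, [])
  | (a, l) :: rest =>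
    if fs < a then (none, (a, l) :: rest)              -- break: no more spaces left of file
    else if fl > l then                                 -- continue: file too big
      let r := pvShiftAFile fs fl rest
      (r.1, (a, l) :: r.2)
    else
      let l' := l - fl                                  -- s_len -= f_len
      if l' ≠ 0 then (some a, (a + fl, l') :: rest)     -- S[i] = (s_start + f_len, s_len)
      else (some a, rest)                               -- S.pop(i)

-- outer 'for f_id, (f_start, f_len) in reversed(F.items())' loop (each key is visited
-- once and mutated only after being read, so iterating the snapshot of items is exact)
def pvShiftALoop : List (Int × Int × Int) → PySem.Dict Int (Int × Int) → List (Int × Int) → PySem.Dict Int (Int × Int)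
  | [], F, _ => F
  | (fid, fa, fl) :: rest, F, S =>
    match pvShiftAFile fa fl S with
    | (some s, S') => pvShiftALoop rest (F.insert fid (s, fl)) S'   -- F[f_id] = (s_start, f_len)
    | (none, S') => pvShiftALoop rest F S'

def shift_file (F : List (Int × Int × Int)) (S : List (Int × Int)) : List (Int × Int × Int) :=
  (pvShiftALoop F.reverse (PySem.Dict.mk F) S).items

-- ===== PORT B =====
def pvNEG : Int := -4611686018427387904   -- -(1 << 62), B's 'NEG'

-- B's tree nodes [max_start, max_len, left, right]
inductive Seg where
  | leaf : Int → Int → Seg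
  | node : Int → Int → Seg → Seg → Seg
deriving DecidableEq, Repr

def segRootA : Seg → Int
  | .leaf a _ => a
  | .node ms _ _ _ => ms

def segRootL : Seg → Int
  | .leaf _ l => l
  | .node _ ml _ _ => ml

-- B's 'build(i, j)' (only called with i < j ≤ len S; S[i] ported as getD, exact there)
def segBuild (S : List (Int × Int)) (i j : Nat) : Seg :=
  if _h : j - i ≤ 1 then
    let p := S.getD i (0, 0)
    .leaf p.1 p.2
  else
    let m := (i + j) / 2
    let left := segBuild S i m
    let right := segBuild S m j
    .node (max (segRootA left) (segRootA right)) (max (segRootL left) (segRootL right)) left right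
termination_by j - i
decreasing_by all_goals omega

-- B's 'place': none = "no", some none = break (None), some (some s) = placed at s
def segPlace (t : Seg) (fs fl : Int) : Option (Option Int) × Seg :=
  match t with
  | .leaf a l =>
    if a > fs ∨ l ≥ fl then
      if fs < a then (some none, .leaf a l)
      else
        let rem := l - fl
        if rem ≠ 0 then (some (some a), .leaf (a + fl) rem)
        else (some (some a), .leaf pvNEG pvNEG)
    else (none, .leaf a l)
  | .node ms ml left right =>
    if ms > fs ∨ ml ≥ fl then
      match segPlace left fs fl with
      | (some (some s), left') =>
        (some (some s), .node (max (segRootA left') (segRootA right)) (max (segRootL left') (segRootL right)) left' right)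
      | (some none, left') => (some none, .node ms ml left' right)
      | (none, left') =>
        match segPlace right fs fl with
        | (some (some s), right') =>
          (some (some s), .node (max (segRootA left') (segRootA right')) (max (segRootL left') (segRootL right')) left' right')
        | (r2, right') => (r2, .node ms ml left' right')
    else (none, t)

-- B's 'for f_id in reversed(list(F.keys()))' loop
def pvAltLoop : List (Int × Int × Int) → PySem.Dict Int (Int × Int) → Seg → PySem.Dict Int (Int × Int) × Seg
  | [], F, t => (F, t)
  | (fid, fa, fl) :: rest, F, t =>
    match segPlace t fa fl with
    | (some (some s), t') => pvAltLoop rest (F.insert fid (s, fl)) t'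
    | (_, t') => pvAltLoop rest F t'

def shift_file_alt (F : List (Int × Int × Int)) (S : List (Int × Int)) : List (Int × Int × Int) :=
  match S with
  | [] => F
  | _ :: _ =>
    let root := segBuild S 0 S.length
    (pvAltLoop F.reverse (PySem.Dict.mk F) root).1.items

-- ===== PRECONDITION & SPEC =====
-- Pre_ excludes association lists with duplicate file ids: those do not represent a
-- Python dict (A's parameter F), which collapses duplicate keys before A ever runs.
def Pre_shift_file (F : List (Int × Int × Int)) (S : List (Int × Int)) : Prop :=
  (F.map Prod.fst).Nodup

instance (F : List (Int × Int × Int)) (S : List (Int × Int)) : Decidable (Pre_shift_file F S) := by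
  unfold Pre_shift_file; infer_instance

def pvWitness_shift_file : (List (Int × Int × Int)) × (List (Int × Int)) :=
  ([(0, 20, 2), (1, 30, 3), (2, 40, 5)], [(0, 3), (10, 4)])

def Spec_shift_file (F : List (Int × Int × Int)) (S : List (Int × Int)) (out : List (Int × Int × Int)) : Prop := out = shift_file_alt F S
instance (F : List (Int × Int × Int)) (S : List (Int × Int)) (out : List (Int × Int × Int)) : Decidable (Spec_shift_file F S out) := by unfold Spec_shift_file; infer_instance

-- ===== CLAIM (what is proved, stated in full; the proofs are below) =====
def Claim_equal_shift_file : Prop := ∀ (F : List (Int × Int × Int)) (S : List (Int × Int)), Dom_shift_file F S → Pre_shift_file F S → Spec_shift_file F S (shift_file F S)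

-- ===== LEMMAS AND PROOFS =====

-- list model of a tree: its leaves, left to right
def segToList : Seg → List (Int × Int)
  | .leaf a l => [(a, l)]
  | .node _ _ left right => segToList left ++ segToList right

-- well-formedness: every node caches the maxima of its children
def segWF : Seg → Prop
  | .leaf _ _ => True
  | .node ms ml left right =>
    ms = max (segRootA left) (segRootA right) ∧ ml = max (segRootL left) (segRootL right) ∧ segWF left ∧ segWF right

-- list-level account of one segPlace call (what the descent computes, on the leaves)
def scanB (fs fl : Int) : List (Int × Int) → Option (Option Int) × List (Int × Int)
  | [] => (none, [])
  | (a, l) :: rest =>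
    if a > fs ∨ l ≥ fl then
      if fs < a then (some none, (a, l) :: rest)
      else if l - fl ≠ 0 then (some (some a), (a + fl, l - fl) :: rest)
      else (some (some a), (pvNEG, pvNEG) :: rest)
    else
      let r := scanB fs fl rest
      (r.1, (a, l) :: r.2)

-- entries of a wf tree are bounded by its cached maxima
theorem seg_root_bound (t : Seg) (h : segWF t) :
    ∀ p ∈ segToList t, p.1 ≤ segRootA t ∧ p.2 ≤ segRootL t := by
  induction t with
  | leaf a l => intro p hp; simp [segToList] at hp; simp [hp, segRootA, segRootL]
  | node ms ml left right ihl ihr =>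
    obtain ⟨hms, hml, hwl, hwr⟩ := h
    intro p hp
    simp only [segToList, List.mem_append] at hp
    rcases hp with hp | hp
    · obtain ⟨h1, h2⟩ := ihl hwl p hp
      refine ⟨?_, ?_⟩
      · show p.1 ≤ ms
        rw [hms]; exact le_trans h1 (le_max_left _ _)
      · show p.2 ≤ ml
        rw [hml]; exact le_trans h2 (le_max_left _ _)
    · obtain ⟨h1, h2⟩ := ihr hwr p hp
      refine ⟨?_, ?_⟩
      · show p.1 ≤ ms
        rw [hms]; exact le_trans h1 (le_max_right _ _)
      · show p.2 ≤ ml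
        rw [hml]; exact le_trans h2 (le_max_right _ _)

theorem scanB_of_noStop (fs fl : Int) (xs : List (Int × Int))
    (h : ∀ p ∈ xs, p.1 ≤ fs ∧ p.2 < fl) : scanB fs fl xs = (none, xs) := by
  induction xs with
  | nil => rfl
  | cons q rest ih =>
    obtain ⟨a, l⟩ := q
    have hq := h (a, l) (by simp)
    have hrest := ih (fun p hp => h p (by simp [hp]))
    simp only [scanB]
    rw [if_neg (by omega)]
    simp [hrest]

theorem scanB_none_eq (fs fl : Int) (xs : List (Int × Int))
    (h : (scanB fs fl xs).1 = none) : (scanB fs fl xs).2 = xs := by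
  induction xs with
  | nil => rfl
  | cons q rest ih =>
    obtain ⟨a, l⟩ := q
    simp only [scanB] at h ⊢
    by_cases hg : a > fs ∨ l ≥ fl
    · rw [if_pos hg] at h
      by_cases hb : fs < a
      · rw [if_pos hb] at h; simp at h
      · rw [if_neg hb] at h
        by_cases hz : l - fl ≠ 0
        · rw [if_pos hz] at h; simp at h
        · rw [if_neg hz] at h; simp at h
    · rw [if_neg hg] at h ⊢
      simpa using ih h

theorem scanB_break_eq (fs fl : Int) (xs : List (Int × Int))
    (h : (scanB fs fl xs).1 = some none) : (scanB fs fl xs).2 = xs := by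
  induction xs with
  | nil => simp [scanB] at h
  | cons q rest ih =>
    obtain ⟨a, l⟩ := q
    simp only [scanB] at h ⊢
    by_cases hg : a > fs ∨ l ≥ fl
    · rw [if_pos hg] at h ⊢
      by_cases hb : fs < a
      · rw [if_pos hb]
      · rw [if_neg hb] at h ⊢
        by_cases hz : l - fl ≠ 0
        · rw [if_pos hz] at h; simp at h
        · rw [if_neg hz] at h; simp at h
    · rw [if_neg hg] at h ⊢
      simpa using ih h

theorem scanB_append (fs fl : Int) (xs ys : List (Int × Int)) :
    scanB fs fl (xs ++ ys) =
      match scanB fs fl xs with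
      | (none, _) => ((scanB fs fl ys).1, xs ++ (scanB fs fl ys).2)
      | (some x, xs') => (some x, xs' ++ ys) := by
  induction xs with
  | nil => simp [scanB]
  | cons q rest ih =>
    obtain ⟨a, l⟩ := q
    simp only [List.cons_append, scanB]
    split
    · split
      · simp
      · split <;> simp
    · rw [ih]
      rcases hr : scanB fs fl rest with ⟨r1, rest'⟩
      rcases r1 with _ | x <;> simp

-- a descent that does not place leaves the tree unchanged
theorem segPlace_unchanged (t : Seg) (fs fl : Int)
    (h : (segPlace t fs fl).1 = none ∨ (segPlace t fs fl).1 = some none) :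
    (segPlace t fs fl).2 = t := by
  induction t with
  | leaf a l =>
    simp only [segPlace] at h ⊢
    by_cases hg : a > fs ∨ l ≥ fl
    · rw [if_pos hg] at h ⊢
      by_cases hb : fs < a
      · rw [if_pos hb]
      · rw [if_neg hb] at h ⊢
        by_cases hz : l - fl ≠ 0
        · rw [if_pos hz] at h; simp at h
        · rw [if_neg hz] at h; simp at h
    · rw [if_neg hg]
  | node ms ml left right ihl ihr =>
    simp only [segPlace] at h ⊢
    by_cases hg : ms > fs ∨ ml ≥ fl
    · rw [if_pos hg] at h ⊢
      rcases hL : segPlace left fs fl with ⟨rL, left'⟩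
      rw [hL] at ihl h
      rcases rL with _ | (_ | s)
      · have hle : left' = left := ihl (Or.inl rfl)
        rcases hR : segPlace right fs fl with ⟨rR, right'⟩
        rw [hR] at ihr h
        rcases rR with _ | (_ | s)
        · have : right' = right := ihr (Or.inl rfl)
          simp [this, hle]
        · have : right' = right := ihr (Or.inr rfl)
          simp [this, hle]
        · simp at h
      · have : left' = left := ihl (Or.inr rfl)
        simp [this]
      · simp at h
    · rw [if_neg hg]

-- the tree descent computes exactly the list-level scan on its leaves
theorem segPlace_spec (t : Seg) (fs fl : Int) (h : segWF t) :
    (segPlace t fs fl).1 = (scanB fs fl (segToList t)).1 ∧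
    segToList (segPlace t fs fl).2 = (scanB fs fl (segToList t)).2 ∧
    segWF (segPlace t fs fl).2 := by
  induction t with
  | leaf a l =>
    by_cases hg : a > fs ∨ l ≥ fl
    · by_cases hb : fs < a
      · have hres : segPlace (Seg.leaf a l) fs fl = (some none, Seg.leaf a l) := by
          simp only [segPlace]; rw [if_pos hg, if_pos hb]
        have hscan : scanB fs fl (segToList (Seg.leaf a l)) = (some none, [(a, l)]) := by
          simp only [segToList, scanB]; rw [if_pos hg, if_pos hb]
        rw [hres, hscan]; exact ⟨rfl, rfl, trivial⟩
      · by_cases hz : l - fl ≠ 0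
        · have hres : segPlace (Seg.leaf a l) fs fl = (some (some a), Seg.leaf (a + fl) (l - fl)) := by
            simp only [segPlace]; rw [if_pos hg, if_neg hb, if_pos hz]
          have hscan : scanB fs fl (segToList (Seg.leaf a l)) = (some (some a), [(a + fl, l - fl)]) := by
            simp only [segToList, scanB]; rw [if_pos hg, if_neg hb, if_pos hz]
          rw [hres, hscan]; exact ⟨rfl, rfl, trivial⟩
        · have hres : segPlace (Seg.leaf a l) fs fl = (some (some a), Seg.leaf pvNEG pvNEG) := by
            simp only [segPlace]; rw [if_pos hg, if_neg hb, if_neg hz]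
          have hscan : scanB fs fl (segToList (Seg.leaf a l)) = (some (some a), [(pvNEG, pvNEG)]) := by
            simp only [segToList, scanB]; rw [if_pos hg, if_neg hb, if_neg hz]
          rw [hres, hscan]; exact ⟨rfl, rfl, trivial⟩
    · have hres : segPlace (Seg.leaf a l) fs fl = (none, Seg.leaf a l) := by
        simp only [segPlace]; rw [if_neg hg]
      have hscan : scanB fs fl (segToList (Seg.leaf a l)) = (none, [(a, l)]) := by
        simp only [segToList, scanB]; rw [if_neg hg]
      rw [hres, hscan]; exact ⟨rfl, rfl, trivial⟩
  | node ms ml left right ihl ihr =>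
    obtain ⟨hms, hml, hwl, hwr⟩ := h
    have IHL := ihl hwl
    have IHR := ihr hwr
    by_cases hg : ms > fs ∨ ml ≥ fl
    · have hsc := scanB_append fs fl (segToList left) (segToList right)
      rcases hL : segPlace left fs fl with ⟨rL, left'⟩
      rw [hL] at IHL
      have hunchL := segPlace_unchanged left fs fl
      rw [hL] at hunchL
      rcases hsl : scanB fs fl (segToList left) with ⟨sl1, sl2⟩
      rw [hsl] at IHL hsc
      have hbrkL := scanB_break_eq fs fl (segToList left)
      have hnonL := scanB_none_eq fs fl (segToList left)
      rw [hsl] at hbrkL hnonL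
      rcases rL with _ | (_ | s)
      · -- left: no stopping space; descend right
        have h1 : sl1 = none := IHL.1.symm
        subst h1
        have hle : left' = left := hunchL (Or.inl rfl)
        have hsl2 : sl2 = segToList left := hnonL rfl
        rcases hR : segPlace right fs fl with ⟨rR, right'⟩
        rw [hR] at IHR
        have hunchR := segPlace_unchanged right fs fl
        rw [hR] at hunchR
        rcases hsr : scanB fs fl (segToList right) with ⟨sr1, sr2⟩
        rw [hsr] at IHR hsc
        have hbrkR := scanB_break_eq fs fl (segToList right)
        have hnonR := scanB_none_eq fs fl (segToList right)
        rw [hsr] at hbrkR hnonR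
        rcases rR with _ | (_ | s)
        · have h2 : sr1 = none := IHR.1.symm
          subst h2
          have hre : right' = right := hunchR (Or.inl rfl)
          have hsr2 : sr2 = segToList right := hnonR rfl
          have hres : segPlace (Seg.node ms ml left right) fs fl = (none, Seg.node ms ml left' right') := by
            simp only [segPlace]; rw [if_pos hg, hL, hR]
          have hscan : scanB fs fl (segToList (Seg.node ms ml left right)) = (none, segToList left ++ sr2) := by
            simp only [segToList]; rw [hsc]
          rw [hres, hscan, hle, hre, hsr2]
          exact ⟨rfl, rfl, hms, hml, hwl, hwr⟩
        · have h2 : sr1 = some none := IHR.1.symm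
          subst h2
          have hre : right' = right := hunchR (Or.inr rfl)
          have hsr2 : sr2 = segToList right := hbrkR rfl
          have hres : segPlace (Seg.node ms ml left right) fs fl = (some none, Seg.node ms ml left' right') := by
            simp only [segPlace]; rw [if_pos hg, hL, hR]
          have hscan : scanB fs fl (segToList (Seg.node ms ml left right)) = (some none, segToList left ++ sr2) := by
            simp only [segToList]; rw [hsc]
          rw [hres, hscan, hle, hre, hsr2]
          exact ⟨rfl, rfl, hms, hml, hwl, hwr⟩
        · have h2 : sr1 = some (some s) := IHR.1.symm
          subst h2
          have hres : segPlace (Seg.node ms ml left right) fs fl =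
              (some (some s), Seg.node (max (segRootA left') (segRootA right')) (max (segRootL left') (segRootL right')) left' right') := by
            simp only [segPlace]; rw [if_pos hg, hL, hR]
          have hscan : scanB fs fl (segToList (Seg.node ms ml left right)) = (some (some s), segToList left ++ sr2) := by
            simp only [segToList]; rw [hsc]
          rw [hres, hscan]
          refine ⟨rfl, ?_, rfl, rfl, hle ▸ hwl, IHR.2.2⟩
          show segToList left' ++ segToList right' = segToList left ++ sr2
          rw [IHR.2.1, hle]
      · -- left: scan breaks inside the left subtree
        have h1 : sl1 = some none := IHL.1.symm
        subst h1
        have hle : left' = left := hunchL (Or.inr rfl)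
        have hsl2 : sl2 = segToList left := hbrkL rfl
        have hres : segPlace (Seg.node ms ml left right) fs fl = (some none, Seg.node ms ml left' right) := by
          simp only [segPlace]; rw [if_pos hg, hL]
        have hscan : scanB fs fl (segToList (Seg.node ms ml left right)) = (some none, sl2 ++ segToList right) := by
          simp only [segToList]; rw [hsc]
        rw [hres, hscan, hle, hsl2]
        exact ⟨rfl, rfl, hms, hml, hwl, hwr⟩
      · -- left: the file was placed in the left subtree
        have h1 : sl1 = some (some s) := IHL.1.symm
        subst h1
        have hres : segPlace (Seg.node ms ml left right) fs fl =
            (some (some s), Seg.node (max (segRootA left') (segRootA right)) (max (segRootL left') (segRootL right)) left' right) := by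
          simp only [segPlace]; rw [if_pos hg, hL]
        have hscan : scanB fs fl (segToList (Seg.node ms ml left right)) = (some (some s), sl2 ++ segToList right) := by
          simp only [segToList]; rw [hsc]
        rw [hres, hscan]
        refine ⟨rfl, ?_, rfl, rfl, IHL.2.2, hwr⟩
        show segToList left' ++ segToList right = sl2 ++ segToList right
        rw [IHL.2.1]
    · have hno : ∀ p ∈ segToList (Seg.node ms ml left right), p.1 ≤ fs ∧ p.2 < fl := by
        intro p hp
        have hbd := seg_root_bound (Seg.node ms ml left right) ⟨hms, hml, hwl, hwr⟩ p hp
        simp only [segRootA, segRootL] at hbd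
        push_neg at hg
        omega
      have hres : segPlace (Seg.node ms ml left right) fs fl = (none, Seg.node ms ml left right) := by
        simp only [segPlace]; rw [if_neg hg]
      rw [hres, scanB_of_noStop _ _ _ hno]
      exact ⟨rfl, rfl, hms, hml, hwl, hwr⟩

-- live spaces of B's leaf list (deactivated leaves carry pvNEG)
def pvLive (xs : List (Int × Int)) : List (Int × Int) := xs.filter (fun p => p.2 ≠ pvNEG)

-- invariant: deactivated leaves are exactly (pvNEG, pvNEG)
def pvInv (xs : List (Int × Int)) : Prop := ∀ p ∈ xs, p.2 = pvNEG → p.1 = pvNEG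

-- A's scan over the live spaces = B's scan over all leaves
theorem scan_rel (fs fl : Int) (hfs : pvNEG ≤ fs) (hfl : pvNEG < fl)
    (xs : List (Int × Int)) (hInv : pvInv xs) :
    pvShiftAFile fs fl (pvLive xs) = ((scanB fs fl xs).1.join, pvLive (scanB fs fl xs).2) ∧
    pvInv (scanB fs fl xs).2 := by
  induction xs with
  | nil => exact ⟨rfl, fun p hp => by simp [scanB] at hp⟩
  | cons q rest ih =>
    obtain ⟨a, l⟩ := q
    have hInvRest : pvInv rest := fun p hp hn => hInv p (by simp [hp]) hn
    have IH := ih hInvRest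
    by_cases hsent : l = pvNEG
    · have ha : a = pvNEG := hInv (a, l) (by simp) hsent
      have hg : ¬(a > fs ∨ l ≥ fl) := by
        subst ha; subst hsent; unfold pvNEG at hfs hfl ⊢; omega
      have hscan : scanB fs fl ((a, l) :: rest) = ((scanB fs fl rest).1, (a, l) :: (scanB fs fl rest).2) := by
        simp only [scanB]; rw [if_neg hg]
      have hlive : pvLive ((a, l) :: rest) = pvLive rest := by
        simp [pvLive, hsent]
      have hlive2 : pvLive ((a, l) :: (scanB fs fl rest).2) = pvLive (scanB fs fl rest).2 := by
        simp [pvLive, hsent]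
      rw [hscan, hlive]
      refine ⟨?_, ?_⟩
      · rw [hlive2]; exact IH.1
      · intro p hp hn
        rcases List.mem_cons.mp hp with hp | hp
        · subst hp; exact ha
        · exact IH.2 p hp hn
    · have hlive : pvLive ((a, l) :: rest) = (a, l) :: pvLive rest := by
        simp [pvLive, hsent]
      by_cases hb : fs < a
      · have hg : a > fs ∨ l ≥ fl := Or.inl hb
        have hscan : scanB fs fl ((a, l) :: rest) = (some none, (a, l) :: rest) := by
          simp only [scanB]; rw [if_pos hg, if_pos hb]
        have hres : pvShiftAFile fs fl ((a, l) :: pvLive rest) = (none, (a, l) :: pvLive rest) := by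
          simp only [pvShiftAFile]; rw [if_pos hb]
        rw [hscan, hlive, hres]
        exact ⟨rfl, hInv⟩
      · by_cases hc : fl > l
        · have hg : ¬(a > fs ∨ l ≥ fl) := by omega
          have hscan : scanB fs fl ((a, l) :: rest) = ((scanB fs fl rest).1, (a, l) :: (scanB fs fl rest).2) := by
            simp only [scanB]; rw [if_neg hg]
          have hres : pvShiftAFile fs fl ((a, l) :: pvLive rest) =
              ((pvShiftAFile fs fl (pvLive rest)).1, (a, l) :: (pvShiftAFile fs fl (pvLive rest)).2) := by
            simp only [pvShiftAFile]; rw [if_neg hb, if_pos hc]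
          have hlive2 : pvLive ((a, l) :: (scanB fs fl rest).2) = (a, l) :: pvLive (scanB fs fl rest).2 := by
            simp [pvLive, hsent]
          rw [hscan, hlive, hres, IH.1, hlive2]
          refine ⟨rfl, ?_⟩
          intro p hp hn
          rcases List.mem_cons.mp hp with hp | hp
          · subst hp; exact absurd hn hsent
          · exact IH.2 p hp hn
        · have hg : a > fs ∨ l ≥ fl := Or.inr (by omega)
          by_cases hz : l - fl ≠ 0
          · have hscan : scanB fs fl ((a, l) :: rest) = (some (some a), (a + fl, l - fl) :: rest) := by
              simp only [scanB]; rw [if_pos hg, if_neg hb, if_pos hz]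
            have hres : pvShiftAFile fs fl ((a, l) :: pvLive rest) = (some a, (a + fl, l - fl) :: pvLive rest) := by
              simp only [pvShiftAFile]; rw [if_neg hb, if_neg hc, if_pos hz]
            have hnz : l - fl ≠ pvNEG := by unfold pvNEG; omega
            have hlive2 : pvLive ((a + fl, l - fl) :: rest) = (a + fl, l - fl) :: pvLive rest := by
              simp [pvLive, hnz]
            rw [hscan, hlive, hres, hlive2]
            refine ⟨rfl, ?_⟩
            intro p hp hn
            rcases List.mem_cons.mp hp with hp | hp
            · subst hp; exact absurd hn hnz
            · exact hInvRest p hp hn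
          · have hscan : scanB fs fl ((a, l) :: rest) = (some (some a), (pvNEG, pvNEG) :: rest) := by
              simp only [scanB]; rw [if_pos hg, if_neg hb, if_neg hz]
            have hres : pvShiftAFile fs fl ((a, l) :: pvLive rest) = (some a, pvLive rest) := by
              simp only [pvShiftAFile]; rw [if_neg hb, if_neg hc, if_neg hz]
            have hlive2 : pvLive ((pvNEG, pvNEG) :: rest) = pvLive rest := by
              simp [pvLive]
            rw [hscan, hlive, hres, hlive2]
            refine ⟨rfl, ?_⟩
            intro p hp hn
            rcases List.mem_cons.mp hp with hp | hp
            · subst hp; rfl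
            · exact hInvRest p hp hn

theorem segWF_build_aux (S : List (Int × Int)) :
    ∀ n i j, j - i ≤ n → segWF (segBuild S i j) := by
  intro n
  induction n with
  | zero =>
    intro i j h
    rw [segBuild, dif_pos (by omega)]
    trivial
  | succ n ih =>
    intro i j h
    rw [segBuild]
    split
    · trivial
    · exact ⟨rfl, rfl, ih i ((i + j) / 2) (by omega), ih ((i + j) / 2) j (by omega)⟩

theorem segWF_build (S : List (Int × Int)) (i j : Nat) : segWF (segBuild S i j) :=
  segWF_build_aux S (j - i) i j le_rfl

theorem segToList_build (S : List (Int × Int)) (i j : Nat) (h1 : i < j) (h2 : j ≤ S.length) :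
    segToList (segBuild S i j) = (S.drop i).take (j - i) := by
  induction hn : j - i using Nat.strong_induction_on generalizing i j with
  | _ n ihn =>
    subst hn
    rw [segBuild]
    split
    · next hle =>
      have hj : j = i + 1 := by omega
      have hi : i < S.length := by omega
      rw [List.drop_eq_getElem_cons hi]
      have h1 : j - i = 1 := by omega
      rw [h1, List.take_succ_cons, List.take_zero, List.getD_eq_getElem S (0, 0) hi]
      rfl
    · next hgt =>
      have hm1 : i < (i + j) / 2 := by omega
      have hm2 : (i + j) / 2 < j := by omega
      show segToList (segBuild S i ((i + j) / 2)) ++ segToList (segBuild S ((i + j) / 2) j) = _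
      rw [ihn ((i + j) / 2 - i) (by omega) i ((i + j) / 2) hm1 (by omega) rfl,
          ihn (j - (i + j) / 2) (by omega) ((i + j) / 2) j hm2 h2 rfl]
      have hd : S.drop ((i + j) / 2) = (S.drop i).drop ((i + j) / 2 - i) := by
        rw [List.drop_drop]; congr 1; omega
      rw [hd]
      rw [show j - i = ((i + j) / 2 - i) + (j - (i + j) / 2) by omega, List.take_add]

theorem loop_rel (items : List (Int × Int × Int))
    (hb : ∀ x ∈ items, pvNEG ≤ x.2.1 ∧ pvNEG < x.2.2)
    (t : Seg) (hwf : segWF t) (hInv : pvInv (segToList t))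
    (Facc : PySem.Dict Int (Int × Int)) :
    pvShiftALoop items Facc (pvLive (segToList t)) = (pvAltLoop items Facc t).1 := by
  induction items generalizing t Facc with
  | nil => rfl
  | cons q rest ih =>
    obtain ⟨fid, fa, fl⟩ := q
    have hfs : pvNEG ≤ fa := by
      have h := (hb (fid, fa, fl) (by simp)).1; exact h
    have hfl : pvNEG < fl := by
      have h := (hb (fid, fa, fl) (by simp)).2; exact h
    have hbrest : ∀ x ∈ rest, pvNEG ≤ x.2.1 ∧ pvNEG < x.2.2 := fun x hx => hb x (by simp [hx])
    have hps := segPlace_spec t fa fl hwf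
    have hsr := scan_rel fa fl hfs hfl (segToList t) hInv
    rcases hsp : segPlace t fa fl with ⟨r, t'⟩
    rw [hsp] at hps
    have hwf' : segWF t' := hps.2.2
    have hInv' : pvInv (segToList t') := by rw [hps.2.1]; exact hsr.2
    have hlive' : pvLive (segToList t') = pvLive (scanB fa fl (segToList t)).2 := by rw [hps.2.1]
    have hA : pvShiftAFile fa fl (pvLive (segToList t)) = (r.join, pvLive (segToList t')) := by
      rw [hsr.1, hlive', ← hps.1]
    simp only [pvShiftALoop, pvAltLoop]
    rw [hA, hsp]
    rcases r with _ | (_ | s)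
    · exact ih hbrest t' hwf' hInv' Facc
    · exact ih hbrest t' hwf' hInv' Facc
    · exact ih hbrest t' hwf' hInv' (Facc.insert fid (s, fl))

theorem loop_nil (items : List (Int × Int × Int)) (Facc : PySem.Dict Int (Int × Int)) :
    pvShiftALoop items Facc [] = Facc := by
  induction items generalizing Facc with
  | nil => rfl
  | cons q rest ih =>
    obtain ⟨fid, fa, fl⟩ := q
    simp only [pvShiftALoop, pvShiftAFile]
    exact ih Facc

-- ===== VERDICT (by name: the statement is the Claim_ definition above) =====
theorem pvLive_of_bounded (xs : List (Int × Int))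
    (h : ∀ p ∈ xs, -2147483648 ≤ p.2) : pvLive xs = xs := by
  induction xs with
  | nil => rfl
  | cons q rest ih =>
    have hq := h q (by simp)
    have : q.2 ≠ pvNEG := by unfold pvNEG; omega
    simp only [pvLive, List.filter_cons]
    rw [if_pos (by simpa using this)]
    exact congrArg (q :: ·) (ih fun p hp => h p (by simp [hp]))

theorem shift_file_spec : Claim_equal_shift_file := by
  intro F S hDom hPre
  unfold Spec_shift_file
  have hDF : ∀ x ∈ F, (-2147483648 ≤ x.2.1 ∧ x.2.1 ≤ 2147483648) ∧ (-2147483648 ≤ x.2.2 ∧ x.2.2 ≤ 2147483648) := by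
    intro x hx
    unfold Dom_shift_file at hDom
    rw [Bool.and_eq_true, List.all_eq_true, List.all_eq_true] at hDom
    have := hDom.1 x hx
    simp only [Bool.and_eq_true, pvDomInt, decide_eq_true_eq] at this
    exact ⟨this.2.1, this.2.2⟩
  have hDS : ∀ p ∈ S, -2147483648 ≤ p.2 := by
    intro p hp
    unfold Dom_shift_file at hDom
    rw [Bool.and_eq_true, List.all_eq_true, List.all_eq_true] at hDom
    have := hDom.2 p hp
    simp only [Bool.and_eq_true, pvDomInt, decide_eq_true_eq] at this
    exact this.2.1
  cases S with
  | nil =>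
    show shift_file F [] = shift_file_alt F []
    unfold shift_file shift_file_alt
    rw [loop_nil]
  | cons s0 S' =>
    show shift_file F (s0 :: S') = shift_file_alt F (s0 :: S')
    unfold shift_file shift_file_alt
    have hlen : 0 < (s0 :: S').length := by simp
    have hwf := segWF_build (s0 :: S') 0 (s0 :: S').length
    have htl : segToList (segBuild (s0 :: S') 0 (s0 :: S').length) = s0 :: S' := by
      rw [segToList_build (s0 :: S') 0 (s0 :: S').length hlen le_rfl]
      simp
    have hInv : pvInv (segToList (segBuild (s0 :: S') 0 (s0 :: S').length)) := by
      rw [htl]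
      intro p hp hn
      have := hDS p hp
      exfalso
      unfold pvNEG at hn
      omega
    have hb : ∀ x ∈ F.reverse, pvNEG ≤ x.2.1 ∧ pvNEG < x.2.2 := by
      intro x hx
      have := hDF x (List.mem_reverse.mp hx)
      unfold pvNEG
      omega
    have := loop_rel F.reverse hb (segBuild (s0 :: S') 0 (s0 :: S').length) hwf hInv (PySem.Dict.mk F)
    rw [htl, pvLive_of_bounded (s0 :: S') hDS] at this
    rw [this]
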